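-- pv_equiv track=rewrite | github.com/BaeJunH0/Algorithm_practice | 프로그래머스/0/120866. 안전지대/안전지대.py | solution
-- ===== SOURCE A (Python) =====
-- def findBomb(board, x, y):
--     danger = [[0, 1], [1, -1], [0, -1], [-1, -1], [-1, 0], [-1, 1], [1, 0], [1, 1]]
--
--     if board[x][y] != 1:
--         return board
--
--     for i in danger:
--         tx = x + i[0]
--         ty = y + i[1]
--         if tx < len(board) and tx >= 0 and ty < len(board) and ty >= 0:
--             if board[tx][ty] != 1:
--                 board[tx][ty] = 2
--     return board
--
-- def solution(board):
--     length = len(board)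
--
--     for i in range(length):
--         for j in range(length):
--             board = findBomb(board, i, j)
--
--     answer = 0
--     for i in board:
--         for j in i:
--             if j == 0:
--                 answer += 1
--     return answer
-- ===== SOURCE B (Python) =====
-- def solution(board):
--     n = len(board)
--
--     def bomb(x, y):
--         return 0 <= x < n and 0 <= y < n and board[x][y] == 1
--
--     answer = 0
--     for i in range(n):
--         for j in range(n):
--             if board[i][j] == 0 and not any(bomb(i + dx, j + dy)
--                                             for dx in (-1, 0, 1) for dy in (-1, 0, 1)):
--                 answer += 1
--     return answer
-- ===== Notes on version B (the rewrite author's own statement) =====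
-- stated objective: faster
-- what changed: Replaces A's scatter phase (mutating the board to mark each bomb's 8 neighbours with sentinel 2) plus a second counting pass by a single gather pass that counts a cell iff it is 0 and no in-bounds neighbour is a bomb; B does not mutate the input board (A does). Pre_ restricts to square boards, the problem's stated domain: on non-square input A raises IndexError when a row is shorter than len(board), and when rows are longer A and B make different defensible choices about the extra columns outside the len(board)-square grid (A counts their zeros, B ignores them).
-- outside the precondition, e.g. on solution([[0, 1, 0], [0, 0, 0]]): A returns 2, B returns 0
import Mathlib
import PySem

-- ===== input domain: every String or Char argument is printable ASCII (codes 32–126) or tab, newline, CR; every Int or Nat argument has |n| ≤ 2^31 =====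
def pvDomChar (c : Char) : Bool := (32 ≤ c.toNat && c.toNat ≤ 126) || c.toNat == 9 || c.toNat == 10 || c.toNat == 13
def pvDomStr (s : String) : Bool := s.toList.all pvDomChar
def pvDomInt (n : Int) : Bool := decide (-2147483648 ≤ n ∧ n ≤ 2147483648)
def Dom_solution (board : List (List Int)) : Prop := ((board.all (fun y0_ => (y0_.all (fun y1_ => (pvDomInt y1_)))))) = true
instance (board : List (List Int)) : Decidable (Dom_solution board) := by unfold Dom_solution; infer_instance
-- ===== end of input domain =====

-- B replaces A's scatter-marking of blast zones (mutating the board with sentinel 2s, then a second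
-- counting pass) by one gather pass counting cells that are 0 with no in-bounds bomb neighbour
-- (measurably faster by a constant factor); A mutates its argument in place, B does not — the
-- equivalence proved here is about the return value only.

-- ===== PORT A =====
def findBombA (board : List (List Int)) (x y : Int) : List (List Int) :=
  let danger : List (Int × Int) := [(0,1),(1,-1),(0,-1),(-1,-1),(-1,0),(-1,1),(1,0),(1,1)]
  if PySem.List.pyGetD (PySem.List.pyGetD board x []) y 0 ≠ 1 then board
  else
    danger.foldl (fun b i =>
      let tx := x + i.1
      let ty := y + i.2
      if tx < (b.length : Int) ∧ 0 ≤ tx ∧ ty < (b.length : Int) ∧ 0 ≤ ty then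
        (if PySem.List.pyGetD (PySem.List.pyGetD b tx []) ty 0 ≠ 1 then
          PySem.List.pySetD b tx (PySem.List.pySetD (PySem.List.pyGetD b tx []) ty 2)
        else b)
      else b) board

def solution (board : List (List Int)) : Int :=
  let length : Int := (board.length : Int)
  let b2 := (PySem.List.pyRange 0 length 1).foldl (fun b i =>
    (PySem.List.pyRange 0 length 1).foldl (fun b j => findBombA b i j) b) board
  b2.foldl (fun answer i =>
    i.foldl (fun answer j => if j = 0 then answer + 1 else answer) answer) 0

-- ===== PORT B =====
def bombB (board : List (List Int)) (n x y : Int) : Bool :=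
  decide (0 ≤ x) && decide (x < n) && decide (0 ≤ y) && decide (y < n) &&
    (PySem.List.pyGetD (PySem.List.pyGetD board x []) y 0 == 1)

def solution_alt (board : List (List Int)) : Int :=
  let n : Int := (board.length : Int)
  (PySem.List.pyRange 0 n 1).foldl (fun answer i =>
    (PySem.List.pyRange 0 n 1).foldl (fun answer j =>
      if PySem.List.pyGetD (PySem.List.pyGetD board i []) j 0 == 0 &&
          !(([-1,0,1] : List Int).any (fun dx =>
            ([-1,0,1] : List Int).any (fun dy => bombB board n (i + dx) (j + dy))))
      then answer + 1 else answer) answer) 0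

-- ===== PRECONDITION & SPEC =====
-- Pre_ restricts to square boards, the problem's stated domain: on non-square input A raises
-- IndexError when a row is shorter than len(board), and when rows are longer A and B make different
-- defensible choices about the extra columns outside the len(board)-square grid (A counts their
-- zeros, B ignores them).
def Pre_solution (board : List (List Int)) : Prop := ∀ row ∈ board, row.length = board.length
instance (board : List (List Int)) : Decidable (Pre_solution board) := by unfold Pre_solution; infer_instance
def pvWitness_solution : List (List Int) := [[1,0,0],[0,0,0],[0,0,0]]

def Spec_solution (board : List (List Int)) (out : Int) : Prop := out = solution_alt board
instance (board : List (List Int)) (out : Int) : Decidable (Spec_solution board out) := by unfold Spec_solution; infer_instance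

-- ===== CLAIM (what is proved, stated in full; the proofs are below) =====
def Claim_equal_solution : Prop := ∀ (board : List (List Int)), Dom_solution board → Pre_solution board → Spec_solution board (solution board)

-- ===== LEMMAS AND PROOFS =====

-- cell read with Nat indices (0 outside)
def gq (b : List (List Int)) (i j : Nat) : Int := (b.getD i []).getD j 0

-- square board of side n
def Sq (n : Nat) (b : List (List Int)) : Prop := b.length = n ∧ ∀ r ∈ b, r.length = n

def dangerL : List (Int × Int) := [(0,1),(1,-1),(0,-1),(-1,-1),(-1,0),(-1,1),(1,0),(1,1)]

-- one inner-loop step of findBombA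
def mstep (x y : Int) (b : List (List Int)) (i : Int × Int) : List (List Int) :=
  if x + i.1 < (b.length : Int) ∧ 0 ≤ x + i.1 ∧ y + i.2 < (b.length : Int) ∧ 0 ≤ y + i.2 then
    (if PySem.List.pyGetD (PySem.List.pyGetD b (x + i.1) []) (y + i.2) 0 ≠ 1 then
      PySem.List.pySetD b (x + i.1) (PySem.List.pySetD (PySem.List.pyGetD b (x + i.1) []) (y + i.2) 2)
    else b)
  else b

lemma setI_eq (b : List (List Int)) (x y : Int) (hx : 0 ≤ x) (hy : 0 ≤ y) :
    PySem.List.pySetD b x (PySem.List.pySetD (PySem.List.pyGetD b x []) y 2) =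
      b.set x.toNat ((b.getD x.toNat []).set y.toNat 2) := by
  rw [← Int.toNat_of_nonneg hx, ← Int.toNat_of_nonneg hy, PySem.List.pyGetD_natCast,
    PySem.List.pySetD_natCast, PySem.List.pySetD_natCast]
  simp only [Int.toNat_natCast]

lemma findBombA_eq (b : List (List Int)) (x y : Int) :
    findBombA b x y =
      if PySem.List.pyGetD (PySem.List.pyGetD b x []) y 0 ≠ 1 then b
      else dangerL.foldl (mstep x y) b := rfl

lemma gI_eq (b : List (List Int)) (x y : Int) (hx : 0 ≤ x) (hy : 0 ≤ y) :
    PySem.List.pyGetD (PySem.List.pyGetD b x []) y 0 = gq b x.toNat y.toNat := by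
  rw [← Int.toNat_of_nonneg hx, ← Int.toNat_of_nonneg hy, PySem.List.pyGetD_natCast,
    PySem.List.pyGetD_natCast]
  rfl

lemma getD_set_eq {α : Type} (l : List α) (k p : Nat) (a d : α) :
    (l.set k a).getD p d = if p = k ∧ k < l.length then a else l.getD p d := by
  simp only [List.getD_eq_getElem?_getD, List.getElem?_set]
  split_ifs with h1 h2 h3 <;> simp_all

lemma Sq_rowlen {n : Nat} {b : List (List Int)} (h : Sq n b) {i : Nat} (hi : i < n) :
    (b.getD i []).length = n := by
  obtain ⟨hl, hr⟩ := h
  have hib : i < b.length := by omega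
  rw [List.getD_eq_getElem _ _ hib]
  exact hr _ (List.getElem_mem hib)

lemma Sq_set {n : Nat} {b : List (List Int)} (h : Sq n b) {i : Nat} (hi : i < n) (j : Nat) (v : Int) :
    Sq n (b.set i ((b.getD i []).set j v)) := by
  have hrow := Sq_rowlen h hi
  obtain ⟨hl, hr⟩ := h
  refine ⟨by simpa using hl, fun r hrm => ?_⟩
  rcases List.mem_or_eq_of_mem_set hrm with hm | rfl
  · exact hr _ hm
  · simpa using hrow

lemma gq_set (b : List (List Int)) (v : Int) (i j p q : Nat) :
    gq (b.set i ((b.getD i []).set j v)) p q =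
      if p = i ∧ q = j ∧ i < b.length ∧ j < (b.getD i []).length then v else gq b p q := by
  unfold gq
  rw [getD_set_eq]
  by_cases h1 : p = i ∧ i < b.length
  · rw [if_pos h1, getD_set_eq]
    obtain ⟨rfl, hib⟩ := h1
    by_cases h2 : q = j ∧ j < (b.getD p []).length
    · rw [if_pos h2, if_pos ⟨rfl, h2.1, hib, h2.2⟩]
    · rw [if_neg h2, if_neg (by tauto)]
  · rw [if_neg h1, if_neg (by tauto)]

lemma inner_inv (n : Nat) (x y : Int) :
    ∀ (D : List (Int × Int)) (b : List (List Int)), Sq n b →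
      Sq n (D.foldl (mstep x y) b) ∧
      ∀ p q : Nat, gq (D.foldl (mstep x y) b) p q =
        if (∃ d ∈ D, (p : Int) = x + d.1 ∧ (q : Int) = y + d.2 ∧ p < n ∧ q < n ∧ gq b p q ≠ 1)
        then 2 else gq b p q := by
  intro D
  induction D with
  | nil => intro b hb; exact ⟨hb, fun p q => by simp⟩
  | cons d D ih =>
    intro b hb
    have hlen : b.length = n := hb.1
    have hb' : Sq n (mstep x y b d) ∧ ∀ p q : Nat, gq (mstep x y b d) p q =
        if ((p : Int) = x + d.1 ∧ (q : Int) = y + d.2 ∧ p < n ∧ q < n ∧ gq b p q ≠ 1)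
        then 2 else gq b p q := by
      unfold mstep
      by_cases hg : x + d.1 < (b.length : Int) ∧ 0 ≤ x + d.1 ∧ y + d.2 < (b.length : Int) ∧ 0 ≤ y + d.2
      case neg =>
        rw [if_neg hg]
        refine ⟨hb, fun p q => ?_⟩
        rw [if_neg]
        rintro ⟨e1, e2, e3, e4, -⟩
        exact hg ⟨by omega, by omega, by omega, by omega⟩
      case pos =>
        rw [if_pos hg]
        obtain ⟨hg1, hg2, hg3, hg4⟩ := hg
        have hxt : (x + d.1).toNat < n := by omega
        have hyt : (y + d.2).toNat < n := by omega
        by_cases hv : PySem.List.pyGetD (PySem.List.pyGetD b (x + d.1) []) (y + d.2) 0 ≠ 1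
        · rw [if_pos hv, setI_eq b _ _ hg2 hg4]
          have hvq : gq b (x + d.1).toNat (y + d.2).toNat ≠ 1 := by
            rw [← gI_eq b _ _ hg2 hg4]; exact hv
          refine ⟨Sq_set hb hxt _ _, fun p q => ?_⟩
          rw [gq_set]
          by_cases h1 : ((p : Int) = x + d.1 ∧ (q : Int) = y + d.2 ∧ p < n ∧ q < n ∧ gq b p q ≠ 1)
          · rw [if_pos h1, if_pos ⟨by omega, by omega, by omega, by rw [Sq_rowlen hb hxt]; omega⟩]
          · rw [if_neg h1, if_neg]
            rintro ⟨e1, e2, -, -⟩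
            subst e1; subst e2
            exact h1 ⟨by omega, by omega, hxt, hyt, hvq⟩
        · rw [if_neg hv]
          have hvq : gq b (x + d.1).toNat (y + d.2).toNat = 1 := by
            rw [← gI_eq b _ _ hg2 hg4]; simpa using hv
          refine ⟨hb, fun p q => ?_⟩
          rw [if_neg]
          rintro ⟨e1, e2, -, -, e5⟩
          apply e5
          have hp : p = (x + d.1).toNat := by omega
          have hq : q = (y + d.2).toNat := by omega
          rw [hp, hq]; exact hvq
    have hne : ∀ p q : Nat, (gq (mstep x y b d) p q ≠ 1 ↔ gq b p q ≠ 1) := by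
      intro p q
      rw [hb'.2 p q]
      split_ifs with h
      · exact ⟨fun _ => h.2.2.2.2, fun _ => by norm_num⟩
      · exact Iff.rfl
    refine ⟨(ih (mstep x y b d) hb'.1).1, fun p q => ?_⟩
    have hf : (d :: D).foldl (mstep x y) b = D.foldl (mstep x y) (mstep x y b d) := rfl
    rw [hf, (ih (mstep x y b d) hb'.1).2 p q]
    simp only [hne p q, List.exists_mem_cons_iff]
    rw [hb'.2 p q]
    by_cases h1 : ((p : Int) = x + d.1 ∧ (q : Int) = y + d.2 ∧ p < n ∧ q < n ∧ gq b p q ≠ 1)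
      <;> by_cases h2 : (∃ d' ∈ D, (p : Int) = x + d'.1 ∧ (q : Int) = y + d'.2 ∧ p < n ∧ q < n ∧ gq b p q ≠ 1)
      <;> simp [h1, h2]

-- the cells marked 2 after processing the bomb candidates in P
def Mk (orig : List (List Int)) (n : Nat) (P : List (Int × Int)) (p q : Nat) : Prop :=
  p < n ∧ q < n ∧ gq orig p q ≠ 1 ∧
  ∃ z ∈ P, gq orig z.1.toNat z.2.toNat = 1 ∧
    ∃ d ∈ dangerL, (p : Int) = z.1 + d.1 ∧ (q : Int) = z.2 + d.2

def OInv (orig : List (List Int)) (n : Nat) (P : List (Int × Int)) (b : List (List Int)) : Prop :=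
  Sq n b ∧ ∀ p q : Nat,
    (Mk orig n P p q → gq b p q = 2) ∧ (¬ Mk orig n P p q → gq b p q = gq orig p q)

lemma outer_step {orig b : List (List Int)} {n : Nat} {P : List (Int × Int)} {x y : Int}
    (hI : OInv orig n P b) (hx : 0 ≤ x ∧ x < n) (hy : 0 ≤ y ∧ y < n) :
    OInv orig n (P ++ [(x, y)]) (findBombA b x y) := by
  obtain ⟨hsq, hcell⟩ := hI
  have hlen : b.length = n := hsq.1
  have hxt : x.toNat < n := by omega
  have hyt : y.toNat < n := by omega
  have hgi := gI_eq b x y hx.1 hy.1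
  have hne : ∀ p q : Nat, (gq b p q ≠ 1 ↔ gq orig p q ≠ 1) := by
    intro p q
    by_cases hm : Mk orig n P p q
    · rw [(hcell p q).1 hm]
      exact ⟨fun _ => hm.2.2.1, fun _ => by norm_num⟩
    · rw [(hcell p q).2 hm]
  rw [findBombA_eq]
  by_cases hbomb : gq orig x.toNat y.toNat = 1
  case neg =>
    rw [if_pos (by rw [hgi]; exact (hne _ _).mpr (by simpa using hbomb))]
    have hMk : ∀ p q : Nat, Mk orig n (P ++ [(x, y)]) p q ↔ Mk orig n P p q := by
      intro p q
      unfold Mk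
      simp only [List.mem_append, List.mem_singleton]
      constructor
      · rintro ⟨h1, h2, h3, z, (hz | rfl), rest⟩
        · exact ⟨h1, h2, h3, z, hz, rest⟩
        · exact absurd rest.1 hbomb
      · rintro ⟨h1, h2, h3, z, hz, rest⟩
        exact ⟨h1, h2, h3, z, Or.inl hz, rest⟩
    exact ⟨hsq, fun p q => by rw [hMk p q]; exact hcell p q⟩
  case pos =>
    rw [if_neg (by rw [hgi]; simpa using ((hne _ _).not_left.mpr (by simpa using hbomb)))]
    obtain ⟨hsq2, hform⟩ := inner_inv n x y dangerL b hsq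
    have hMk : ∀ p q : Nat, Mk orig n (P ++ [(x, y)]) p q ↔
        Mk orig n P p q ∨
        (∃ d ∈ dangerL, (p : Int) = x + d.1 ∧ (q : Int) = y + d.2 ∧ p < n ∧ q < n ∧ gq b p q ≠ 1) := by
      intro p q
      unfold Mk
      simp only [List.mem_append, List.mem_singleton]
      constructor
      · rintro ⟨h1, h2, h3, z, (hz | rfl), rest⟩
        · exact Or.inl ⟨h1, h2, h3, z, hz, rest⟩
        · obtain ⟨-, d, hd, e1, e2⟩ := rest
          exact Or.inr ⟨d, hd, e1, e2, h1, h2, (hne p q).mpr h3⟩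
      · rintro (⟨h1, h2, h3, z, hz, rest⟩ | ⟨d, hd, e1, e2, h1, h2, h3⟩)
        · exact ⟨h1, h2, h3, z, Or.inl hz, rest⟩
        · exact ⟨h1, h2, (hne p q).mp h3, (x, y), Or.inr rfl, by simpa using hbomb, d, hd, e1, e2⟩
    refine ⟨hsq2, fun p q => ?_⟩
    rw [hform p q]
    constructor
    · intro hm
      rcases (hMk p q).mp hm with hm' | hC
      · split_ifs with hC
        · rfl
        · exact (hcell p q).1 hm'
      · rw [if_pos hC]
    · intro hm
      rw [if_neg (fun hC => hm ((hMk p q).mpr (Or.inr hC)))]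
      exact (hcell p q).2 (fun hm' => hm ((hMk p q).mpr (Or.inl hm')))

lemma outer_fold {orig : List (List Int)} {n : Nat} :
    ∀ (Q P : List (Int × Int)) (b : List (List Int)), OInv orig n P b →
      (∀ z ∈ Q, (0 ≤ z.1 ∧ z.1 < n) ∧ (0 ≤ z.2 ∧ z.2 < n)) →
      OInv orig n (P ++ Q) (Q.foldl (fun b z => findBombA b z.1 z.2) b) := by
  intro Q
  induction Q with
  | nil => intro P b hI _; simpa using hI
  | cons z Q ih =>
    intro P b hI hmem
    have hstep := outer_step hI (hmem z (List.mem_cons_self ..)).1 (hmem z (List.mem_cons_self ..)).2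
    have := ih (P ++ [(z.1, z.2)]) (findBombA b z.1 z.2) hstep
      (fun w hw => hmem w (List.mem_cons_of_mem _ hw))
    simpa using this

lemma double_fold (L1 L2 : List Int) (f : List (List Int) → Int → Int → List (List Int)) :
    ∀ b, L1.foldl (fun b i => L2.foldl (fun b j => f b i j) b) b =
      (L1.flatMap (fun i => L2.map (fun j => (i, j)))).foldl (fun b z => f b z.1 z.2) b := by
  induction L1 with
  | nil => intro b; rfl
  | cons i L1 ih => intro b; simp [List.foldl_append, List.foldl_map, ih]

lemma foldl_range_congr {α : Type} (g : α → Int → Int) (h : Int → Int → Int) :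
    ∀ (xs : List α) (a N acc : Int), N = a + (xs.length : Int) →
      (∀ (k : Nat) (_hk : k < xs.length) (ac : Int), g (xs[k]) ac = h (a + (k : Int)) ac) →
      xs.foldl (fun ac x => g x ac) acc =
        (PySem.List.pyRange a N 1).foldl (fun ac i => h i ac) acc := by
  intro xs
  induction xs with
  | nil =>
    intro a N acc hN _
    rw [PySem.List.pyRange_one_eq_nil (by simp at hN; omega)]
    rfl
  | cons x xs ih =>
    intro a N acc hN hcong
    rw [PySem.List.pyRange_one_cons (by simp at hN; omega)]
    simp only [List.foldl_cons]
    have h0 := hcong 0 (by simp) acc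
    simp only [List.getElem_cons_zero, Nat.cast_zero, add_zero] at h0
    rw [h0]
    refine ih (a + 1) N (h a acc) (by simp at hN ⊢; omega) ?_
    intro k hk ac
    have := hcong (k + 1) (by simpa using hk) ac
    simp only [List.getElem_cons_succ] at this
    rw [show a + ((k + 1 : Nat) : Int) = a + 1 + (k : Int) by push_cast; ring] at this
    exact this

lemma bombB_iff (orig : List (List Int)) (N x y : Int) :
    bombB orig N x y = true ↔
      0 ≤ x ∧ x < N ∧ 0 ≤ y ∧ y < N ∧ gq orig x.toNat y.toNat = 1 := by
  unfold bombB
  simp only [Bool.and_eq_true, decide_eq_true_eq, beq_iff_eq, and_assoc]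
  constructor
  · rintro ⟨h1, h2, h3, h4, h5⟩
    rw [gI_eq orig x y h1 h3] at h5
    exact ⟨h1, h2, h3, h4, h5⟩
  · rintro ⟨h1, h2, h3, h4, h5⟩
    rw [← gI_eq orig x y h1 h3] at h5
    exact ⟨h1, h2, h3, h4, h5⟩

lemma neg_mem_danger {dx dy : Int} (hdx : dx ∈ ([-1, 0, 1] : List Int))
    (hdy : dy ∈ ([-1, 0, 1] : List Int)) (hne : ¬(dx = 0 ∧ dy = 0)) :
    (-dx, -dy) ∈ dangerL := by
  fin_cases hdx <;> fin_cases hdy <;> simp_all <;> decide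

lemma danger_comp {d : Int × Int} (hd : d ∈ dangerL) :
    -d.1 ∈ ([-1, 0, 1] : List Int) ∧ -d.2 ∈ ([-1, 0, 1] : List Int) ∧ ¬(d.1 = 0 ∧ d.2 = 0) := by
  fin_cases hd <;> refine ⟨by decide, by decide, by decide⟩

lemma crux {orig b2 : List (List Int)} {n : Nat} {P : List (Int × Int)}
    (hO : OInv orig n P b2)
    (hP : ∀ z : Int × Int, z ∈ P ↔ ((0 ≤ z.1 ∧ z.1 < (n : Int)) ∧ (0 ≤ z.2 ∧ z.2 < (n : Int))))
    (i j : Nat) (hi : i < n) (hj : j < n) :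
    (gq b2 i j = 0) ↔
      ((gq orig i j = 0) ∧ ¬ ∃ dx ∈ ([-1, 0, 1] : List Int), ∃ dy ∈ ([-1, 0, 1] : List Int),
        bombB orig (n : Int) ((i : Int) + dx) ((j : Int) + dy) = true) := by
  obtain ⟨hsq, hcell⟩ := hO
  constructor
  · intro h0
    have hnm : ¬ Mk orig n P i j := fun hm => by
      have := (hcell i j).1 hm; omega
    have horig0 : gq orig i j = 0 := by rw [← (hcell i j).2 hnm]; exact h0
    refine ⟨horig0, ?_⟩
    rintro ⟨dx, hdx, dy, hdy, hbb⟩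
    obtain ⟨e1, e2, e3, e4, e5⟩ := (bombB_iff orig _ _ _).mp hbb
    have hne : ¬(dx = 0 ∧ dy = 0) := by
      rintro ⟨rfl, rfl⟩
      simp only [add_zero, Int.toNat_natCast] at e5
      omega
    apply hnm
    refine ⟨hi, hj, by omega, ((i : Int) + dx, (j : Int) + dy), ?_, e5, (-dx, -dy),
      neg_mem_danger hdx hdy hne, by ring, by ring⟩
    exact (hP _).mpr ⟨⟨e1, e2⟩, ⟨e3, e4⟩⟩
  · rintro ⟨horig0, hnb⟩
    have hnm : ¬ Mk orig n P i j := by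
      rintro ⟨-, -, -, z, hz, hz1, d, hd, e1, e2⟩
      obtain ⟨hm1, hm2, hm3⟩ := danger_comp hd
      obtain ⟨⟨f1, f2⟩, f3, f4⟩ := (hP z).mp hz
      exact hnb ⟨-d.1, hm1, -d.2, hm2, (bombB_iff orig _ _ _).mpr
        ⟨by omega, by omega, by omega, by omega, by
          rw [show (i : Int) + -d.1 = z.1 by omega, show (j : Int) + -d.2 = z.2 by omega]
          exact hz1⟩⟩
    rw [(hcell i j).2 hnm]
    exact horig0

-- ===== VERDICT (by name: the statement is the Claim_ definition above) =====
theorem solution_spec : Claim_equal_solution := by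
  intro board _ hpre
  unfold Spec_solution
  unfold solution solution_alt
  dsimp only
  rw [double_fold]
  have hmem : ∀ z ∈ ((PySem.List.pyRange 0 (board.length : Int) 1).flatMap
      (fun i => (PySem.List.pyRange 0 (board.length : Int) 1).map (fun j => (i, j)))),
      (0 ≤ z.1 ∧ z.1 < (board.length : Int)) ∧ (0 ≤ z.2 ∧ z.2 < (board.length : Int)) := by
    intro z hz
    simp only [List.mem_flatMap, List.mem_map, PySem.List.mem_pyRange_one] at hz
    obtain ⟨a, ha, b, hb, rfl⟩ := hz
    exact ⟨ha, hb⟩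
  have hPiff : ∀ z : Int × Int, z ∈ ((PySem.List.pyRange 0 (board.length : Int) 1).flatMap
      (fun i => (PySem.List.pyRange 0 (board.length : Int) 1).map (fun j => (i, j)))) ↔
      ((0 ≤ z.1 ∧ z.1 < (board.length : Int)) ∧ (0 ≤ z.2 ∧ z.2 < (board.length : Int))) := by
    intro z
    refine ⟨hmem z, ?_⟩
    rintro ⟨⟨a1, a2⟩, b1, b2⟩
    simp only [List.mem_flatMap, List.mem_map, PySem.List.mem_pyRange_one]
    exact ⟨z.1, ⟨a1, a2⟩, z.2, ⟨b1, b2⟩, by simp⟩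
  have hbase : OInv board board.length [] board :=
    ⟨⟨rfl, hpre⟩, fun p q => ⟨fun hm => absurd hm (by rintro ⟨-, -, -, z, hz, -⟩; simp at hz),
      fun _ => rfl⟩⟩
  have hO := outer_fold _ [] board hbase hmem
  rw [List.nil_append] at hO
  set B2 := ((PySem.List.pyRange 0 (board.length : Int) 1).flatMap
      (fun i => (PySem.List.pyRange 0 (board.length : Int) 1).map (fun j => (i, j)))).foldl
      (fun b z => findBombA b z.1 z.2) board with hB2
  have hsq2 := hO.1
  refine foldl_range_congr
    (fun (row : List Int) (a : Int) =>
      row.foldl (fun answer j => if j = 0 then answer + 1 else answer) a)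
    (fun (i a : Int) =>
      (PySem.List.pyRange 0 (board.length : Int) 1).foldl (fun answer j =>
        if (PySem.List.pyGetD (PySem.List.pyGetD board i []) j 0 == 0 &&
            !(([-1, 0, 1] : List Int).any fun dx =>
              ([-1, 0, 1] : List Int).any fun dy =>
                bombB board (board.length : Int) (i + dx) (j + dy))) = true
        then answer + 1 else answer) a)
    _ 0 _ 0 (by rw [hsq2.1]; ring) ?_
  intro k hk a
  simp only [zero_add]
  have hkb : k < board.length := by have := hsq2.1; omega
  have hrowB2 : (B2[k]'hk).length = board.length := by
    have := Sq_rowlen hsq2 hkb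
    rwa [List.getD_eq_getElem _ _ hk] at this
  refine foldl_range_congr
    (fun (v : Int) (a : Int) => if v = 0 then a + 1 else a)
    (fun (j a : Int) =>
      if (PySem.List.pyGetD (PySem.List.pyGetD board (k : Int) []) j 0 == 0 &&
          !(([-1, 0, 1] : List Int).any fun dx =>
            ([-1, 0, 1] : List Int).any fun dy =>
              bombB board (board.length : Int) ((k : Int) + dx) (j + dy))) = true
      then a + 1 else a)
    _ 0 _ a (by rw [hrowB2]; ring) ?_
  intro m hm a2
  simp only [zero_add]
  have hmn : m < board.length := by omega
  have eA : gq B2 k m = (B2[k]'hk)[m]'hm := by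
    unfold gq
    rw [List.getD_eq_getElem _ _ hk, List.getD_eq_getElem _ _ hm]
  have eg : PySem.List.pyGetD (PySem.List.pyGetD board (k : Int) []) (m : Int) 0 = gq board k m := by
    rw [gI_eq board _ _ (by positivity) (by positivity)]
    simp
  refine if_congr ?_ rfl rfl
  rw [← eA, eg, crux hO hPiff k m hkb hmn]
  simp
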